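-- pv_equiv track=rewrite | github.com/aiporre/pmconv | scripts/example_slerp_polar.py | find_span
-- ===== SOURCE A (Python) =====
-- def find_span(n, p, u, U):
--     if u >= U[n + 1]:
--         return n
--     if u <= U[p]:
--         return p
--     low, high = p, n + 1
--     mid = (low + high) // 2
--     while u < U[mid] or u >= U[mid + 1]:
--         if u < U[mid]:
--             high = mid
--         else:
--             low = mid
--         mid = (low + high) // 2
--     return mid
-- ===== SOURCE B (Python) =====
-- def find_span(n, p, u, U):
--     if u >= U[n + 1]:
--         return n
--     if u <= U[p]:
--         return p
--     return p + sum(1 for j in range(p + 1, n + 1) if U[j] <= u)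
-- ===== Notes on version B (the rewrite author's own statement) =====
-- stated objective: alternative
-- what changed: Replaced the low/high/mid bisection loop by a single counting pass: after the two clamping guards the result is p plus the number of knots U[j] (p < j <= n) that are <= u, since on a nondecreasing knot vector the satisfied indices form a prefix ending at the span containing u.
-- outside the precondition, e.g. on find_span(3, 0, 3, [0, 9, 1, 2, 9]): A returns 3, B returns 2
import Mathlib
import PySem

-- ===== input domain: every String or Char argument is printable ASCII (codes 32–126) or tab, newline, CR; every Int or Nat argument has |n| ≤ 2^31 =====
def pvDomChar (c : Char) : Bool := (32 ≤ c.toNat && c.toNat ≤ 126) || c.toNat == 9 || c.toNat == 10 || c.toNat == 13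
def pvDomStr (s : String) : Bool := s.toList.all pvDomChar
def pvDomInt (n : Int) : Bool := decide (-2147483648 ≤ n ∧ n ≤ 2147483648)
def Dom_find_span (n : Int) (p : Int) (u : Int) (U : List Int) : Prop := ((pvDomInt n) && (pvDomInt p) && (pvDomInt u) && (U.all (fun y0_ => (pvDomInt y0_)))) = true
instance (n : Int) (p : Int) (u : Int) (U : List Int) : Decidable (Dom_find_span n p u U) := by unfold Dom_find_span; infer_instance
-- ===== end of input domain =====

-- B replaces A's low/high/mid bisection by counting the knots U[j] (p < j ≤ n) with U[j] ≤ u; objective: alternative.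

-- ===== PORT A =====
-- A's while-loop, fuel-bounded (fuel only makes the recursion total; under Pre_ it never runs out).
def findSpanLoopA (u : Int) (U : List Int) : Nat → Int → Int → Int → Int
  | 0, _, _, mid => mid
  | fuel + 1, low, high, mid =>
    if u < PySem.List.pyGetD U mid 0 ∨ PySem.List.pyGetD U (mid + 1) 0 ≤ u then
      if u < PySem.List.pyGetD U mid 0 then
        findSpanLoopA u U fuel low mid (PySem.Int.floordiv (low + mid) 2)
      else
        findSpanLoopA u U fuel mid high (PySem.Int.floordiv (mid + high) 2)
    else mid

def find_span (n : Int) (p : Int) (u : Int) (U : List Int) : Int :=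
  if PySem.List.pyGetD U (n + 1) 0 ≤ u then n
  else if u ≤ PySem.List.pyGetD U p 0 then p
  else
    findSpanLoopA u U ((n + 1 - p).toNat + 1) p (n + 1)
      (PySem.Int.floordiv (p + (n + 1)) 2)

-- ===== PORT B =====
-- B's 'sum(1 for j in range(p+1, n+1) if U[j] <= u)' is ported as countP over the same range.
def find_span_alt (n : Int) (p : Int) (u : Int) (U : List Int) : Int :=
  if PySem.List.pyGetD U (n + 1) 0 ≤ u then n
  else if u ≤ PySem.List.pyGetD U p 0 then p
  else
    p + ((PySem.List.pyRange (p + 1) (n + 1) 1).countP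
          (fun j => decide (PySem.List.pyGetD U j 0 ≤ u)) : Int)

-- ===== PRECONDITION & SPEC =====
-- Pre_ admits u clamped to an end span (the shared guards decide the result) and otherwise the
-- B-spline contract 0 ≤ p ≤ n, n+2 ≤ len(U) with a nondecreasing knot vector; it excludes inputs
-- where an out-of-range index makes A raise, and interior searches over a non-nondecreasing U,
-- on which A's bisection can return an accidental index (or loop) while B counts linearly.
def Pre_find_span (n : Int) (p : Int) (u : Int) (U : List Int) : Prop :=
  PySem.Raise.InRange U.length (n + 1) ∧
    (PySem.List.pyGetD U (n + 1) 0 ≤ u ∨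
      (PySem.Raise.InRange U.length p ∧
        (u ≤ PySem.List.pyGetD U p 0 ∨
          (0 ≤ p ∧ p ≤ n ∧ n + 2 ≤ (U.length : Int) ∧ U.Pairwise (· ≤ ·)))))
instance (n : Int) (p : Int) (u : Int) (U : List Int) : Decidable (Pre_find_span n p u U) := by
  unfold Pre_find_span; infer_instance

def pvWitness_find_span : Int × Int × Int × List Int := (2, 1, 3, [0, 1, 2, 5, 9])

def Spec_find_span (n : Int) (p : Int) (u : Int) (U : List Int) (out : Int) : Prop :=
  out = find_span_alt n p u U
instance (n : Int) (p : Int) (u : Int) (U : List Int) (out : Int) :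
    Decidable (Spec_find_span n p u U out) := by unfold Spec_find_span; infer_instance

-- ===== CLAIM (what is proved, stated in full; the proofs are below) =====
def Claim_equal_find_span : Prop := ∀ (n : Int) (p : Int) (u : Int) (U : List Int),
  Dom_find_span n p u U → Pre_find_span n p u U → Spec_find_span n p u U (find_span n p u U)

-- ===== LEMMAS AND PROOFS =====

-- monotonicity of a nondecreasing list, on Int indices via pyGetD
theorem mono_pyGetD (U : List Int) (hs : U.Pairwise (· ≤ ·)) (a b : Int)
    (h0 : 0 ≤ a) (hab : a ≤ b) (hb : b < (U.length : Int)) :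
    PySem.List.pyGetD U a 0 ≤ PySem.List.pyGetD U b 0 := by
  rw [PySem.List.pyGetD_eq_getElem U 0 h0 (by omega),
      PySem.List.pyGetD_eq_getElem U 0 (by omega) hb]
  rcases eq_or_lt_of_le hab with h | h
  · subst h; exact le_refl _
  · exact (List.pairwise_iff_getElem.mp hs) a.toNat b.toNat (by omega) (by omega) (by omega)

-- "i is the span containing u"
def GoodSpan (n p u : Int) (U : List Int) (i : Int) : Prop :=
  p ≤ i ∧ i ≤ n ∧ PySem.List.pyGetD U i 0 ≤ u ∧ u < PySem.List.pyGetD U (i + 1) 0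

theorem goodSpan_unique (n p u : Int) (U : List Int) (hp : 0 ≤ p)
    (hlen : n + 2 ≤ (U.length : Int)) (hs : U.Pairwise (· ≤ ·))
    (i j : Int) (hi : GoodSpan n p u U i) (hj : GoodSpan n p u U j) : i = j := by
  by_contra hne
  rcases hi with ⟨hi1, hi2, hi3, hi4⟩
  rcases hj with ⟨hj1, hj2, hj3, hj4⟩
  rcases lt_or_gt_of_ne hne with h | h
  · have := mono_pyGetD U hs (i + 1) j (by omega) (by omega) (by omega); omega
  · have := mono_pyGetD U hs (j + 1) i (by omega) (by omega) (by omega); omega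

-- A's bisection loop lands on the span
theorem loopA_good (n p u : Int) (U : List Int) :
    ∀ (fuel : Nat) (low high : Int), p ≤ low → high ≤ n + 1 → low < high →
      PySem.List.pyGetD U low 0 ≤ u → u < PySem.List.pyGetD U high 0 →
      (high - low).toNat ≤ fuel →
      GoodSpan n p u U (findSpanLoopA u U fuel low high (PySem.Int.floordiv (low + high) 2)) := by
  intro fuel
  induction fuel with
  | zero => intro low high _ _ hlh _ _ hf; omega
  | succ k ih =>
    intro low high hpl hhn hlh hlow hhigh hf
    have hmid : PySem.Int.floordiv (low + high) 2 = (low + high) / 2 :=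
      PySem.Int.floordiv_eq_ediv_of_pos (by omega)
    set mid := (low + high) / 2 with hmdef
    have hb1 : low ≤ mid := by omega
    have hb2 : mid < high := by omega
    rw [findSpanLoopA, hmid]
    split
    · next hcond =>
      have hne : low + 2 ≤ high := by
        by_contra h
        have : high = low + 1 := by omega
        have : mid = low := by omega
        rcases hcond with h1 | h1
        · rw [this] at h1; omega
        · have : mid + 1 = high := by omega
          rw [this] at h1; omega
      split
      · next hlt =>
        rw [hmid] at *
        exact ih low mid hpl (by omega) (by omega) hlow hlt (by omega)
      · next hge =>
        rw [hmid] at *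
        rcases hcond with h1 | h1
        · exact absurd h1 hge
        · exact ih mid high (by omega) hhn (by omega) (by omega) hhigh (by omega)
    · next hcond =>
      push_neg at hcond
      exact ⟨by omega, by omega, hcond.1, hcond.2⟩

-- countP of a downward-closed predicate over a consecutive integer range is a prefix length:
-- P j holds exactly for the first c elements of the range.
theorem countP_prefix (P : Int → Bool) :
    ∀ (len : Nat) (a : Int),
      (∀ j k : Int, a ≤ k → k ≤ j → j < a + len → P j = true → P k = true) →
      ∀ j : Int, a ≤ j → j < a + len →
        (P j = true ↔ j < a + ((PySem.List.pyRange a (a + len) 1).countP P : Int)) := by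
  intro len
  induction len with
  | zero => intro a _ j h1 h2; omega
  | succ k ih =>
    intro a hdc j hj1 hj2
    have hend : a + ((k + 1 : Nat) : Int) = (a + 1) + ((k : Nat) : Int) := by push_cast; omega
    rw [hend, PySem.List.pyRange_one_cons (by omega), List.countP_cons]
    have ih' := ih (a + 1)
      (fun j' k' h1 h2 h3 h4 => hdc j' k' (by omega) h2 (by push_cast at h3 ⊢; omega) h4)
    by_cases hPa : P a = true
    · rw [hPa]
      by_cases hja : j = a
      · subst hja
        simp only [hPa, if_pos, true_iff]
        push_cast; omega
      · have hi := ih' j (by omega) (by push_cast at hj2 ⊢; omega)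
        rw [hi]; simp only [if_pos rfl]; push_cast; omega
    · have hall : ∀ x ∈ PySem.List.pyRange (a + 1) ((a + 1) + ((k : Nat) : Int)) 1,
          ¬ P x = true := by
        intro x hx hPx
        rw [PySem.List.mem_pyRange_one] at hx
        exact hPa (hdc x a le_rfl (by omega) (by push_cast; omega) hPx)
      have hz : (PySem.List.pyRange (a + 1) ((a + 1) + ((k : Nat) : Int)) 1).countP P = 0 :=
        List.countP_eq_zero.mpr hall
      have hPj : ¬ P j = true := fun hPx => hPa (hdc j a le_rfl hj1 hj2 hPx)
      rw [Bool.not_eq_true] at hPa hPj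
      rw [hPa, hPj, hz]
      simp only [Bool.false_eq_true, false_iff, if_false]
      omega

-- B's count lands on the span
theorem count_good (n p u : Int) (U : List Int) (hp : 0 ≤ p) (hpn : p ≤ n)
    (hlen : n + 2 ≤ (U.length : Int)) (hs : U.Pairwise (· ≤ ·))
    (hg1 : u < PySem.List.pyGetD U (n + 1) 0) (hg2 : PySem.List.pyGetD U p 0 < u) :
    GoodSpan n p u U
      (p + ((PySem.List.pyRange (p + 1) (n + 1) 1).countP
          (fun j => decide (PySem.List.pyGetD U j 0 ≤ u)) : Int)) := by
  set P : Int → Bool := fun j => decide (PySem.List.pyGetD U j 0 ≤ u) with hP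
  have hdc : ∀ j k : Int, p + 1 ≤ k → k ≤ j → j < p + 1 + ((n - p).toNat : Int) →
      P j = true → P k = true := by
    intro j k h1 h2 h3 h4
    simp only [hP, decide_eq_true_eq] at h4 ⊢
    exact le_trans (mono_pyGetD U hs k j (by omega) h2 (by omega)) h4
  have hrange : (n : Int) + 1 = p + 1 + ((n - p).toNat : Int) := by omega
  have hpre := countP_prefix P ((n - p).toNat) (p + 1) hdc
  rw [hrange]
  set c : Int := ((PySem.List.pyRange (p + 1) (p + 1 + ((n - p).toNat : Int)) 1).countP P : Int)
    with hc
  have hc0 : 0 ≤ c := Int.natCast_nonneg _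
  have hcb : c ≤ ((n - p).toNat : Int) := by
    have := List.countP_le_length (l := PySem.List.pyRange (p + 1) (p + 1 + ((n - p).toNat : Int)) 1) (p := P)
    have hl := PySem.List.length_pyRange_one (p + 1) (p + 1 + ((n - p).toNat : Int))
    omega
  refine ⟨by omega, by omega, ?_, ?_⟩
  · -- U[p+c] ≤ u
    rcases eq_or_lt_of_le hc0 with h | h
    · rw [← h]; simpa using le_of_lt hg2
    · have := (hpre (p + c) (by omega) (by omega)).mpr (by omega)
      simpa [hP] using this
  · -- u < U[p+c+1]
    by_cases hend : p + c + 1 ≤ n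
    · have := (hpre (p + c + 1) (by omega) (by omega))
      have hnot : ¬ P (p + c + 1) = true := by
        intro hPx
        have := this.mp hPx; omega
      simp only [hP, decide_eq_true_eq] at hnot
      have : p + c + 1 = p + c + 1 := rfl
      omega
    · have : p + c + 1 = n + 1 := by omega
      rw [this]; exact hg1

-- ===== VERDICT (by name: the statement is the Claim_ definition above) =====
theorem find_span_spec : Claim_equal_find_span := by
  intro n p u U _ hpre
  rcases hpre with ⟨-, hpre⟩
  unfold Spec_find_span find_span find_span_alt
  split
  · rfl
  · next hg1 =>
    split
    · rfl
    · next hg2 =>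
      push_neg at hg1 hg2
      rcases hpre with h | ⟨-, h⟩
      · omega
      rcases h with h | ⟨hp, hpn, hlen, hs⟩
      · omega
      exact goodSpan_unique n p u U hp hlen hs _ _
        (loopA_good n p u U _ p (n + 1) le_rfl le_rfl (by omega) (by omega) hg1
          (by omega))
        (count_good n p u U hp hpn hlen hs hg1 hg2)
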